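-- pv_equiv track=rewrite | github.com/NafiHasan/Cryptography-and-Security-Labs | Lab 1/Lab-1 Codes/p2.py | find_repeat_distances
-- ===== SOURCE A (Python) =====
-- def find_repeat_distances(text, min_length=3):
--     repeats = {}
--     for length in range(min_length, len(text) // 2):
--         for i in range(len(text) - length):
--             substring = text[i:i+length]
--             if substring in text[i+length:]:
--                 distance = text[i+length:].index(substring) + length
--                 if length not in repeats:
--                     repeats[length] = []
--                 repeats[length].append(distance)
--     return repeats
-- ===== SOURCE B (Python) =====
-- def find_repeat_distances(text, min_length=3):
--     n = len(text)
--     repeats = {}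
--     for length in range(min_length, n // 2):
--         # index every window of this length by its content, positions ascending
--         occ = {}
--         for q in range(n - length + 1):
--             occ.setdefault(text[q:q + length], []).append(q)
--         distances = []
--         for i in range(n - length):
--             for p in occ[text[i:i + length]]:
--                 if p >= i + length:
--                     distances.append(p - i)
--                     break
--         if distances:
--             repeats[length] = distances
--     return repeats
-- ===== Notes on version B (the rewrite author's own statement) =====
-- stated objective: alternative
-- what changed: Instead of slicing the suffix and running two substring searches for every position, B builds one hash index per length mapping each window to its ascending list of start positions and reads the next occurrence of a window directly from that index.
-- outside the precondition, e.g. on find_repeat_distances('ab', -1): A returns {-1: [-1, -1], 0: [0, 0]}, B returns {-1: [0, 0, -1], 0: [0, 0]}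
import Mathlib
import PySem

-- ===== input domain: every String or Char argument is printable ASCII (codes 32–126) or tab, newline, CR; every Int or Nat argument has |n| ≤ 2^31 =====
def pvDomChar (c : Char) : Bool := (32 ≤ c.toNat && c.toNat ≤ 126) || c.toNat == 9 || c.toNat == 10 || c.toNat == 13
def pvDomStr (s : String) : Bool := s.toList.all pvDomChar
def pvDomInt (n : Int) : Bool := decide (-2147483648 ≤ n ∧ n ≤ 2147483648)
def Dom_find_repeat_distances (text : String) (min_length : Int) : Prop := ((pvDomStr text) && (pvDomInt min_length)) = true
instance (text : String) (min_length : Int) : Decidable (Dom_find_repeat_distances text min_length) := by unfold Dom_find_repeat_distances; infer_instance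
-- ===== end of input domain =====

-- B replaces A's per-position suffix slicing and double substring search by one per-length
-- hash index from each window to its ascending start positions (objective: alternative).
-- ===== PORT A =====
-- body of A's inner loop over i (a named helper for the loop body; same steps as the Python)
def frdBodyA (s : List Char) (length : Int) (repeats : PySem.Dict Int (List Int)) (i : Int) :
    PySem.Dict Int (List Int) :=
  let substring := PySem.Chars.slice s (some i) (some (i + length))
  if PySem.Chars.isIn substring (PySem.Chars.slice s (some (i + length)) none) then
    -- text[i+length:].index(substring): guarded by the 'in' test, so index = find (exact here)
    let distance := PySem.Chars.find (PySem.Chars.slice s (some (i + length)) none) substring + length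
    let repeats := if repeats.contains length then repeats else repeats.insert length []
    repeats.modify length [] (fun v => v ++ [distance])
  else repeats

-- body of A's outer loop over length
def frdStepA (s : List Char) (repeats : PySem.Dict Int (List Int)) (length : Int) :
    PySem.Dict Int (List Int) :=
  (PySem.List.pyRange 0 ((s.length : Int) - length) 1).foldl (frdBodyA s length) repeats

def find_repeat_distances (text : String) (min_length : Int) : List (Int × List Int) :=
  let s := text.toList
  ((PySem.List.pyRange min_length (PySem.Int.floordiv s.length 2) 1).foldl
    (frdStepA s) PySem.Dict.empty).items

-- ===== PORT B =====
-- occ: one pass indexing every window of this length by its content (positions ascending)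
def frdOccB (s : List Char) (length : Int) : PySem.Dict (List Char) (List Int) :=
  (PySem.List.pyRange 0 ((s.length : Int) - length + 1) 1).foldl
    (fun occ q =>
      -- occ.setdefault(text[q:q+length], []).append(q)
      occ.modify (PySem.Chars.slice s (some q) (some (q + length))) [] (fun ps => ps ++ [q]))
    PySem.Dict.empty

-- distances: for each i, first indexed position p ≥ i+length of the window starting at i
def frdDistsB (s : List Char) (length : Int) : List Int :=
  let occ := frdOccB s length
  (PySem.List.pyRange 0 ((s.length : Int) - length) 1).foldl
    (fun distances i =>
      -- occ[text[i:i+length]] is always present (i itself is indexed), so getD [] is exact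
      match (occ.getD (PySem.Chars.slice s (some i) (some (i + length))) []).find?
              (fun p => decide (i + length ≤ p)) with
      | some p => distances ++ [p - i]
      | none => distances)
    []

def frdStepB (s : List Char) (repeats : PySem.Dict Int (List Int)) (length : Int) :
    PySem.Dict Int (List Int) :=
  let distances := frdDistsB s length
  if distances = [] then repeats else repeats.insert length distances

def find_repeat_distances_alt (text : String) (min_length : Int) : List (Int × List Int) :=
  let s := text.toList
  ((PySem.List.pyRange min_length (PySem.Int.floordiv s.length 2) 1).foldl
    (frdStepB s) PySem.Dict.empty).items

-- ===== PRECONDITION & SPEC =====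
-- Pre_ excludes negative min_length, where Python's negative slice bounds wrap around and both
-- programs emit accidental entries keyed by negative substring lengths — a corner no caller would
-- specify; A and B each do their own natural thing there.
def Pre_find_repeat_distances (text : String) (min_length : Int) : Prop := 0 ≤ min_length
instance (text : String) (min_length : Int) : Decidable (Pre_find_repeat_distances text min_length) := by
  unfold Pre_find_repeat_distances; infer_instance

def pvWitness_find_repeat_distances : String × Int := ("abcabcab", 3)

def Spec_find_repeat_distances (text : String) (min_length : Int) (out : List (Int × List Int)) : Prop :=
  out = find_repeat_distances_alt text min_length
instance (text : String) (min_length : Int) (out : List (Int × List Int)) :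
    Decidable (Spec_find_repeat_distances text min_length out) := by
  unfold Spec_find_repeat_distances; infer_instance

-- ===== CLAIM (what is proved, stated in full; the proofs are below) =====
def Claim_equal_find_repeat_distances : Prop :=
  ∀ (text : String) (min_length : Int), Dom_find_repeat_distances text min_length →
    Pre_find_repeat_distances text min_length →
    Spec_find_repeat_distances text min_length (find_repeat_distances text min_length)

-- ===== LEMMAS AND PROOFS =====

-- find? through a filter
theorem pvFind?_filter {α : Type} (l : List α) (Q p : α → Bool) :
    (l.filter Q).find? p = l.find? (fun a => Q a && p a) := by
  induction l with
  | nil => rfl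
  | cons x xs ih =>
    by_cases hQ : Q x = true
    · by_cases hp : p x = true
      · simp [List.filter_cons, hQ, List.find?_cons, hp]
      · simp [List.filter_cons, hQ, List.find?_cons, hp, ih]
    · simp [List.filter_cons, List.find?_cons, hQ, ih]

-- find? on range: the first k satisfying P
theorem pvFind?_range_eq_some {P : Nat → Bool} {m k : Nat}
    (hk : k < m) (hP : P k = true) (hmin : ∀ j < k, P j = false) :
    (List.range m).find? P = some k := by
  induction m with
  | zero => omega
  | succ m ih =>
    rw [List.range_succ, List.find?_append]
    by_cases hkm : k < m
    · rw [ih hkm]; rfl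
    · have hkeq : m = k := by omega
      have hnone : (List.range m).find? P = none := by
        rw [List.find?_eq_none]
        intro j hj
        simp only [List.mem_range] at hj
        simp [hmin j (by omega)]
      rw [hnone]
      simp [List.find?_cons, hkeq, hP]

theorem pvFind?_range_eq_none {P : Nat → Bool} {m : Nat}
    (h : ∀ j < m, P j = false) : (List.range m).find? P = none := by
  rw [List.find?_eq_none]
  intro j hj
  simp only [List.mem_range] at hj
  simp [h j hj]


-- A's ensure-key-then-append fold over one length collapses to a single conditional insert
theorem pvFoldl_condInsert (g : Int → Option Int) (L : Int) :
    ∀ (xs : List Int) (d : PySem.Dict Int (List Int)), d.contains L = false → ∀ (acc : List Int),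
    xs.foldl (fun r i => match g i with
        | some v => PySem.Dict.modify (if r.contains L then r else r.insert L []) L [] (fun w => w ++ [v])
        | none => r)
      (if acc = [] then d else d.insert L acc)
    = if (acc ++ xs.filterMap g) = [] then d else d.insert L (acc ++ xs.filterMap g) := by
  intro xs
  induction xs with
  | nil => intro d hd acc; simp
  | cons x xs ih =>
    intro d hd acc
    cases hx : g x with
    | none =>
      simp only [List.foldl_cons, hx]
      have := ih d hd acc
      simpa [List.filterMap_cons, hx] using this
    | some v =>
      by_cases hacc : acc = []
      · subst hacc
        have hst : PySem.Dict.modify (if d.contains L then d else d.insert L []) L []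
              (fun w => w ++ [v]) = d.insert L [v] := by
          simp [PySem.Dict.modify, hd, PySem.Dict.getD_insert_self,
            PySem.Dict.insert_insert_self]
        simp only [List.foldl_cons, hx, reduceIte]
        rw [hst]
        have := ih d hd [v]
        rw [if_neg (by simp)] at this
        simpa [List.filterMap_cons, hx] using this
      · simp only [List.foldl_cons, hx]
        rw [if_neg hacc]
        have hst : PySem.Dict.modify
              (if (d.insert L acc).contains L then d.insert L acc else (d.insert L acc).insert L []) L []
              (fun w => w ++ [v]) = d.insert L (acc ++ [v]) := by
          simp [PySem.Dict.modify, PySem.Dict.contains_insert_self,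
            PySem.Dict.getD_insert_self, PySem.Dict.insert_insert_self]
        rw [hst]
        have := ih d hd (acc ++ [v])
        rw [if_neg (by simp)] at this
        simpa [List.filterMap_cons, hx] using this

-- per-position option computed by A
def pvOptA (s : List Char) (L i : Int) : Option Int :=
  let sub := PySem.Chars.slice s (some i) (some (i + L))
  if PySem.Chars.isIn sub (PySem.Chars.slice s (some (i + L)) none) then
    some (PySem.Chars.find (PySem.Chars.slice s (some (i + L)) none) sub + L)
  else none

-- per-position option computed by B
def pvOptB (s : List Char) (L i : Int) : Option Int :=
  (((frdOccB s L).getD (PySem.Chars.slice s (some i) (some (i + L))) []).find?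
      (fun p => decide (i + L ≤ p))).map (fun p => p - i)

-- B's distance fold is a filterMap of its per-position option
theorem pvFoldl_optB (s : List Char) (L : Int) :
    ∀ (xs : List Int) (acc : List Int),
    xs.foldl (fun distances i =>
        match ((frdOccB s L).getD (PySem.Chars.slice s (some i) (some (i + L))) []).find?
            (fun p => decide (i + L ≤ p)) with
        | some p => distances ++ [p - i]
        | none => distances) acc
      = acc ++ xs.filterMap (pvOptB s L) := by
  intro xs
  induction xs with
  | nil => intro acc; simp
  | cons x xs ih =>
    intro acc
    simp only [List.foldl_cons, List.filterMap_cons]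
    cases hx : ((frdOccB s L).getD (PySem.Chars.slice s (some x) (some (x + L))) []).find?
        (fun p => decide (x + L ≤ p)) with
    | none =>
      have hB : pvOptB s L x = none := by unfold pvOptB; rw [hx]; rfl
      rw [hB]
      exact ih acc
    | some p =>
      have hB : pvOptB s L x = some (p - x) := by unfold pvOptB; rw [hx]; rfl
      rw [hB]
      simpa using ih (acc ++ [p - x])

-- B's occ lookup is the ascending list of matching window positions
theorem pvOcc_getD (s : List Char) (L : Int) (sub : List Char) :
    (frdOccB s L).getD sub [] =
      ((List.range ((s.length : Int) - L + 1).toNat).filter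
          (fun q : Nat => PySem.List.slice s (some (q : Int)) (some ((q : Int) + L)) == sub)).map
        (fun q : Nat => (q : Int)) := by
  have h := PySem.Dict.getD_foldl_modify_append
    ((PySem.List.pyRange 0 ((s.length : Int) - L + 1) 1).map
      (fun q => (PySem.Chars.slice s (some q) (some (q + L)), q)))
    PySem.Dict.empty sub
  rw [List.foldl_map] at h
  simp only [] at h
  unfold frdOccB
  rw [h]
  rw [PySem.List.pyRange_one]
  simp [List.filter_map, List.map_map, Function.comp_def,
    PySem.Chars.slice_eq_listSlice, ← List.map_eq_flatMap]

-- the core per-position equality: A's find-in-suffix = B's first indexed position ≥ i+L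
theorem pvOpt_eq (s : List Char) (L i : Int) (hL : 0 ≤ L) (hi : 0 ≤ i)
    (hin : i < (s.length : Int) - L) : pvOptA s L i = pvOptB s L i := by
  obtain ⟨ℓ, rfl⟩ := Int.eq_ofNat_of_zero_le hL
  obtain ⟨j, rfl⟩ := Int.eq_ofNat_of_zero_le hi
  have hjn : j + ℓ < s.length := by omega
  have hcast : ((j : Int) + (ℓ : Int)) = ((j + ℓ : Nat) : Int) := by push_cast; ring
  have hsub : PySem.Chars.slice s (some (j : Int)) (some ((j : Int) + (ℓ : Int)))
      = (s.drop j).take ℓ := by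
    simp [PySem.Chars.slice_eq_listSlice, PySem.List.slice_natCast_add]
  have hsuf : PySem.Chars.slice s (some ((j : Int) + (ℓ : Int))) none = s.drop (j + ℓ) := by
    rw [PySem.Chars.slice_eq_listSlice, hcast, PySem.List.slice_from_natCast]
  have hslice : ∀ q : Nat, PySem.List.slice s (some (q : Int)) (some ((q : Int) + (ℓ : Int)))
      = (s.drop q).take ℓ := by
    intro q; exact PySem.List.slice_natCast_add s q ℓ
  have hsublen : ((s.drop j).take ℓ).length = ℓ := by
    simp [List.length_take, List.length_drop]; omega
  unfold pvOptA pvOptB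
  dsimp only
  rw [hsub, hsuf, pvOcc_getD, List.find?_map, pvFind?_filter]
  set sub := (s.drop j).take ℓ with hsubdef
  set m := ((s.length : Int) - (ℓ : Int) + 1).toNat with hmdef
  set P : Nat → Bool := fun q =>
    (PySem.List.slice s (some (q : Int)) (some ((q : Int) + (ℓ : Int))) == sub)
      && ((fun p => decide ((j : Int) + (ℓ : Int) ≤ p)) ∘ fun q : Nat => (q : Int)) q with hPdef
  have hPiff : ∀ q : Nat, P q = true ↔ ((s.drop q).take ℓ = sub ∧ j + ℓ ≤ q) := by
    intro q
    rw [hPdef]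
    simp only [Function.comp, Bool.and_eq_true, beq_iff_eq, decide_eq_true_eq, hslice q]
    constructor
    · rintro ⟨h1, h2⟩; exact ⟨h1, by omega⟩
    · rintro ⟨h1, h2⟩; exact ⟨h1, by push_cast; omega⟩
  by_cases hIn : PySem.Chars.isIn sub (s.drop (j + ℓ)) = true
  · -- a repeat exists: both sides report the first occurrence at or after j + ℓ
    rw [if_pos hIn]
    have hf0 : 0 ≤ PySem.Chars.find (s.drop (j + ℓ)) sub :=
      (PySem.Chars.find_nonneg_iff _ _).mpr ((PySem.Chars.isIn_iff_infix _ _).mp hIn)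
    obtain ⟨hfpre, hfmin⟩ := PySem.Chars.find_spec hf0
    set f := PySem.Chars.find (s.drop (j + ℓ)) sub with hfdef
    have hflen : f ≤ ((s.drop (j + ℓ)).length : Int) := PySem.Chars.find_le_length _ _
    have hfn : f.toNat ≤ s.length - (j + ℓ) := by
      simp [List.length_drop] at hflen; omega
    have hpre : sub <+: s.drop (j + ℓ + f.toNat) := by
      have h := hfpre
      rw [List.drop_drop] at h
      exact h
    have hq0ℓ : (j + ℓ + f.toNat) + ℓ ≤ s.length := by
      have h1 := hpre.length_le
      simp [List.length_drop, hsublen] at h1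
      omega
    have hq0m : j + ℓ + f.toNat < m := by omega
    have hPq0 : P (j + ℓ + f.toNat) = true := by
      rw [hPiff]
      refine ⟨?_, by omega⟩
      have := List.prefix_iff_eq_take.mp hpre
      rw [hsublen] at this
      exact this.symm
    have hmin : ∀ q' < j + ℓ + f.toNat, P q' = false := by
      intro q' hq'
      by_contra hc
      have hPq' := hPiff q' |>.mp (by revert hc; cases P q' <;> simp)
      obtain ⟨htake, hge⟩ := hPq'
      have hpref : sub <+: s.drop q' := by
        rw [← htake]; exact List.take_prefix _ _
      have : sub <+: (s.drop (j + ℓ)).drop (q' - (j + ℓ)) := by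
        rw [List.drop_drop, show j + ℓ + (q' - (j + ℓ)) = q' by omega]
        exact hpref
      exact hfmin (q' - (j + ℓ)) (by omega) this
    rw [pvFind?_range_eq_some hq0m hPq0 hmin]
    simp only [Option.map_some]
    congr 1
    have : (f.toNat : Int) = f := Int.toNat_of_nonneg hf0
    push_cast
    omega
  · -- no repeat: A's 'in' test fails; B finds no indexed position ≥ j + ℓ
    rw [if_neg hIn]
    have hnone : ∀ q < m, P q = false := by
      intro q _
      by_contra hc
      have hPq := hPiff q |>.mp (by revert hc; cases P q <;> simp)
      obtain ⟨htake, hge⟩ := hPq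
      have hpref : sub <+: s.drop q := by
        rw [← htake]; exact List.take_prefix _ _
      have hshift : sub <+: (s.drop (j + ℓ)).drop (q - (j + ℓ)) := by
        rw [List.drop_drop, show j + ℓ + (q - (j + ℓ)) = q by omega]
        exact hpref
      exact hIn ((PySem.Chars.exists_prefix_drop_iff_isIn sub (s.drop (j + ℓ))).mp ⟨_, hshift⟩)
    rw [pvFind?_range_eq_none hnone]
    rfl

-- per length, A's inner loop equals B's conditional insert (for a fresh key)
theorem pvStep_eq (s : List Char) (L : Int) (hL : 0 ≤ L)
    (d : PySem.Dict Int (List Int)) (hd : d.contains L = false) :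
    frdStepA s d L = frdStepB s d L := by
  have hdists : frdDistsB s L
      = (PySem.List.pyRange 0 ((s.length : Int) - L) 1).filterMap (pvOptB s L) := by
    unfold frdDistsB
    dsimp only
    have h2 := pvFoldl_optB s L (PySem.List.pyRange 0 ((s.length : Int) - L) 1) ([] : List Int)
    simp only [List.nil_append] at h2
    exact h2
  have hAB : (PySem.List.pyRange 0 ((s.length : Int) - L) 1).filterMap (pvOptB s L)
      = (PySem.List.pyRange 0 ((s.length : Int) - L) 1).filterMap (pvOptA s L) := by
    apply List.filterMap_congr
    intro i hi
    have hmem := PySem.List.mem_pyRange_one.mp hi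
    exact (pvOpt_eq s L i hL hmem.1 hmem.2).symm
  have hbody : frdBodyA s L
      = (fun (r : PySem.Dict Int (List Int)) (i : Int) => match pvOptA s L i with
          | some v => PySem.Dict.modify (if r.contains L then r else r.insert L []) L []
              (fun w => w ++ [v])
          | none => r) := by
    funext r i
    unfold frdBodyA pvOptA
    dsimp only
    by_cases h : PySem.Chars.isIn (PySem.Chars.slice s (some i) (some (i + L)))
        (PySem.Chars.slice s (some (i + L)) none) = true
    · rw [if_pos h, if_pos h]
    · rw [if_neg h, if_neg h]
  unfold frdStepA frdStepB
  rw [hbody]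
  have h := pvFoldl_condInsert (pvOptA s L) L
    (PySem.List.pyRange 0 ((s.length : Int) - L) 1) d hd []
  simp only [reduceIte, List.nil_append] at h
  rw [h]
  dsimp only
  rw [hdists, hAB]

-- outer fold: fold both step functions over strictly increasing fresh keys
theorem pvOuter_eq (s : List Char) :
    ∀ (xs : List Int), xs.Pairwise (· < ·) → (∀ L ∈ xs, 0 ≤ L) →
    ∀ (d : PySem.Dict Int (List Int)), (∀ L ∈ xs, d.contains L = false) →
    xs.foldl (frdStepA s) d = xs.foldl (frdStepB s) d := by
  intro xs
  induction xs with
  | nil => intro _ _ d _; rfl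
  | cons L xs ih =>
    intro hpw h0 d hd
    rw [List.pairwise_cons] at hpw
    simp only [List.foldl_cons]
    rw [pvStep_eq s L (h0 L (List.mem_cons_self)) d (hd L (List.mem_cons_self))]
    apply ih hpw.2 (fun L' hL' => h0 L' (List.mem_cons_of_mem L hL'))
    intro L' hL'
    unfold frdStepB
    dsimp only
    by_cases hnil : frdDistsB s L = []
    · rw [if_pos hnil]; exact hd L' (List.mem_cons_of_mem L hL')
    · rw [if_neg hnil, PySem.Dict.contains_insert]
      have hlt : L < L' := hpw.1 L' hL'
      have : (L' == L) = false := by simp; omega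
      rw [this, hd L' (List.mem_cons_of_mem L hL')]
      rfl

-- ===== VERDICT (by name: the statement is the Claim_ definition above) =====
theorem find_repeat_distances_spec : Claim_equal_find_repeat_distances := by
  intro text min_length _hdom hpre
  unfold Spec_find_repeat_distances find_repeat_distances find_repeat_distances_alt
  dsimp only
  congr 1
  apply pvOuter_eq
  · exact PySem.List.pairwise_lt_pyRange_one _ _
  · intro L hL
    have := (PySem.List.mem_pyRange_one.mp hL).1
    exact le_trans hpre this
  · intro L _
    exact PySem.Dict.contains_empty L
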